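-- pv_equiv track=rewrite | github.com/renatehauseruzh/rev-resp-sentalign | alignment/evaluate.py | partial_tp_fp_fn
-- ===== SOURCE A (Python) =====
-- def partial_tp_fp_fn(hyp_al, gs_al):
--     tp, fp, fn = 0, 0, 0
--
--     # tp and fp: partial+complete alignment
--     for hyp_rev, hyp_resp in hyp_al:
--         matching_rev, matching_resp = False, False
--         for gs_rev, gs_resp in gs_al:
--             matching_rev = False
--             for i in hyp_rev:
--                 if i in gs_rev:
--                     matching_rev = True
--                     break
--             # if there is no tuple in the gs where one of the review sentences occurs in a tuple, no partial match
--             if not matching_rev: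
--                 #fp += 1
--                 continue
--             # if there is a matching tuple where one of the rev sents occurs, check if also a matching resp exists
--             matching_resp = False
--             for i in hyp_resp:
--                 if i in gs_resp and matching_rev:
--                     matching_resp = True
--                     break
--
--             if matching_rev and matching_resp:
--                 #tp += 1
--                 break
--             #else:
--             #    fp += 1
--         if matching_rev and matching_resp:
--             tp += 1
--         else:
--             fp += 1
--
--     # false negatives: there is an alignment in the goldstandard that has no partial correspondence in the hypothesis
--     for gs_rev, gs_resp in gs_al:
--         matching_rev, matching_resp = False, False
--         for hyp_rev, hyp_resp in hyp_al:
--             matching_rev = False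
--             for i in gs_rev:
--                 if i in hyp_rev:
--                     matching_rev = True
--                     break
--             # if there is no tuple in the gs where one of the review sentences occurs in a tuple, no partial match
--             if not matching_rev:
--                 #fn += 1
--                 continue
--             # if there is a matching tuple where one of the rev sents occurs, check if also a matching resp exists
--             matching_resp = False
--             for i in gs_resp:
--                 if i in hyp_resp:
--                     matching_resp = True
--                     break
--             if matching_resp:
--                 break
--                 #fn += 1
--         if not (matching_rev and matching_resp):
--             fn += 1
--     return tp, fp, fn
-- ===== SOURCE B (Python) =====
-- def partial_tp_fp_fn(hyp_al, gs_al):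
--     def build_index(al, side):
--         idx = {}
--         for k, pair in enumerate(al):
--             for i in pair[side]:
--                 idx.setdefault(i, set()).add(k)
--         return idx
--
--     def count_matched(src, rev_idx, resp_idx):
--         empty = set()
--         n = 0
--         for rev, resp in src:
--             cand = set()
--             for i in rev:
--                 cand |= rev_idx.get(i, empty)
--             if not cand:
--                 continue
--             cand2 = set()
--             for j in resp:
--                 cand2 |= resp_idx.get(j, empty)
--             if cand & cand2:
--                 n += 1
--         return n
--
--     tp = count_matched(hyp_al, build_index(gs_al, 0), build_index(gs_al, 1))
--     matched_gs = count_matched(gs_al, build_index(hyp_al, 0), build_index(hyp_al, 1))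
--     return tp, len(hyp_al) - tp, len(gs_al) - matched_gs
-- ===== Notes on version B (the rewrite author's own statement) =====
-- stated objective: alternative
-- what changed: Replaces A's nested hyp-by-gs scans with per-sentence list membership by inverted indices (sentence -> set of tuple indices) built once per side; each tuple is then classified by unioning its sentences' candidate-index sets and testing whether the rev-side and resp-side candidate sets intersect. Avoids the quadratic pairwise scan when overlaps are sparse, but on dense inputs A's early break is as cheap, so no speed is claimed.
import Mathlib
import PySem

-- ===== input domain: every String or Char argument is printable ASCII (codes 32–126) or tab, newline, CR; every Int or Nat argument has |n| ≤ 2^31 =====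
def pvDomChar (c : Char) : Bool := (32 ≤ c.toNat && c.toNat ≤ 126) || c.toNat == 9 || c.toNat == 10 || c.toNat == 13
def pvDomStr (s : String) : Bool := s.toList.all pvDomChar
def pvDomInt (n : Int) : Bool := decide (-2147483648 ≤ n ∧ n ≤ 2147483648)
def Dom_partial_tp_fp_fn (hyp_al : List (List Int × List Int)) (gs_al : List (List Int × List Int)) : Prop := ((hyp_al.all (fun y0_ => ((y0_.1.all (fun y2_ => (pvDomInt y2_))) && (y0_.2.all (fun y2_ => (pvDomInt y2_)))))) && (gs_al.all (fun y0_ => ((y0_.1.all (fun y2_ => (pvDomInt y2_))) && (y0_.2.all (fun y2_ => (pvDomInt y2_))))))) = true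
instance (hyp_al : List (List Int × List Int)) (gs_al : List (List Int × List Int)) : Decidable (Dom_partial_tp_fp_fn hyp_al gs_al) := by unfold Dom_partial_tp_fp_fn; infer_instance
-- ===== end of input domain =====

-- B replaces A's nested hyp×gs×sentence scans by inverted indices (sentence → set of tuple
-- indices) built once per side, so each tuple is classified by set-union/intersection of
-- candidate indices; return value only, no argument is mutated by either program.

-- ===== PORT A =====
-- 'for i in xs: if i in g: matching = True; break'
def pvMemScan (xs g : List Int) : Bool :=
  match xs with
  | [] => false
  | i :: rest => if g.contains i then true else pvMemScan rest g

-- 'for i in xs: if i in g and mrev: matching_resp = True; break'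
def pvMemScanAnd (xs g : List Int) (mrev : Bool) : Bool :=
  match xs with
  | [] => false
  | i :: rest => if g.contains i && mrev then true else pvMemScanAnd rest g mrev

-- A's inner 'for gs_rev, gs_resp in gs_al' loop; carries (matching_rev, matching_resp)
def pvScanGs (r s : List Int) : List (List Int × List Int) → Bool → Bool → Bool × Bool
  | [], mrev, mresp => (mrev, mresp)
  | (gr, gq) :: rest, _mrev, mresp =>
    let mrev := pvMemScan r gr
    if !mrev then pvScanGs r s rest mrev mresp
    else
      let mresp' := pvMemScanAnd s gq mrev
      if mrev && mresp' then (mrev, mresp') else pvScanGs r s rest mrev mresp'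

-- A's inner 'for hyp_rev, hyp_resp in hyp_al' loop of the fn pass
def pvScanHyp (gr gq : List Int) : List (List Int × List Int) → Bool → Bool → Bool × Bool
  | [], mrev, mresp => (mrev, mresp)
  | (hr, hq) :: rest, _mrev, mresp =>
    let mrev := pvMemScan gr hr
    if !mrev then pvScanHyp gr gq rest mrev mresp
    else
      let mresp' := pvMemScan gq hq
      if mresp' then (mrev, mresp') else pvScanHyp gr gq rest mrev mresp'

def partial_tp_fp_fn (hyp_al : List (List Int × List Int)) (gs_al : List (List Int × List Int)) : Int × Int × Int :=
  let tpfp : Int × Int := hyp_al.foldl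
    (fun acc p =>
      let m := pvScanGs p.1 p.2 gs_al false false
      if m.1 && m.2 then (acc.1 + 1, acc.2) else (acc.1, acc.2 + 1)) (0, 0)
  let fn : Int := gs_al.foldl
    (fun n g =>
      let m := pvScanHyp g.1 g.2 hyp_al false false
      if !(m.1 && m.2) then n + 1 else n) 0
  (tpfp.1, tpfp.2, fn)

-- ===== PORT B =====
-- build_index(al, side): sentence → set of indices of tuples whose 'side' list contains it
def pvBuildIndex (al : List (List Int × List Int)) (side : Nat) : PySem.Dict Int (PySem.Set Int) :=
  (PySem.List.enumerate al).foldl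
    (fun idx kp =>
      (if side == 0 then kp.2.1 else kp.2.2).foldl
        (fun idx i => idx.modify i PySem.Set.empty (fun st => PySem.Set.add st kp.1)) idx)
    PySem.Dict.empty

-- count_matched(src, rev_idx, resp_idx)
def pvCountMatched (src : List (List Int × List Int)) (ridx sidx : PySem.Dict Int (PySem.Set Int)) : Int :=
  src.foldl
    (fun n p =>
      let cand := p.1.foldl (fun c i => PySem.Set.union c (ridx.getD i PySem.Set.empty)) PySem.Set.empty
      if cand.isEmpty then n
      else
        let cand2 := p.2.foldl (fun c j => PySem.Set.union c (sidx.getD j PySem.Set.empty)) PySem.Set.empty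
        if !(PySem.Set.inter cand cand2).isEmpty then n + 1 else n)
    0

def partial_tp_fp_fn_alt (hyp_al : List (List Int × List Int)) (gs_al : List (List Int × List Int)) : Int × Int × Int :=
  let tp := pvCountMatched hyp_al (pvBuildIndex gs_al 0) (pvBuildIndex gs_al 1)
  let matched_gs := pvCountMatched gs_al (pvBuildIndex hyp_al 0) (pvBuildIndex hyp_al 1)
  (tp, (hyp_al.length : Int) - tp, (gs_al.length : Int) - matched_gs)

-- ===== PRECONDITION & SPEC =====
def Spec_partial_tp_fp_fn (hyp_al : List (List Int × List Int)) (gs_al : List (List Int × List Int)) (out : Int × Int × Int) : Prop := out = partial_tp_fp_fn_alt hyp_al gs_al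
instance (hyp_al : List (List Int × List Int)) (gs_al : List (List Int × List Int)) (out : Int × Int × Int) : Decidable (Spec_partial_tp_fp_fn hyp_al gs_al out) := by unfold Spec_partial_tp_fp_fn; infer_instance

-- ===== CLAIM (what is proved, stated in full; the proofs are below) =====
def Claim_equal_partial_tp_fp_fn : Prop := ∀ (hyp_al : List (List Int × List Int)) (gs_al : List (List Int × List Int)), Dom_partial_tp_fp_fn hyp_al gs_al → Spec_partial_tp_fp_fn hyp_al gs_al (partial_tp_fp_fn hyp_al gs_al)

-- ===== LEMMAS AND PROOFS =====

-- 'some sentence of p's side-1 list occurs in g's side-1 list, and likewise for side 2'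
def pvOverlap (p g : List Int × List Int) : Bool :=
  (p.1.any (fun i => g.1.contains i)) && (p.2.any (fun j => g.2.contains j))

lemma pvMemScan_eq (xs g : List Int) : pvMemScan xs g = xs.any (fun i => g.contains i) := by
  induction xs with
  | nil => rfl
  | cons i rest ih => simp [pvMemScan, ih]

lemma pvMemScanAnd_eq (xs g : List Int) : pvMemScanAnd xs g true = xs.any (fun i => g.contains i) := by
  induction xs with
  | nil => rfl
  | cons i rest ih => simp [pvMemScanAnd, ih]

lemma pvScanGs_eq (r s : List Int) (al : List (List Int × List Int)) (m0 : Bool) :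
    ((pvScanGs r s al m0 false).1 && (pvScanGs r s al m0 false).2)
      = al.any (fun g => pvOverlap (r, s) g) := by
  induction al generalizing m0 with
  | nil => simp [pvScanGs]
  | cons g rest ih =>
    obtain ⟨gr, gq⟩ := g
    rw [List.any_cons]
    have hov : pvOverlap (r, s) (gr, gq) = (pvMemScan r gr && pvMemScanAnd s gq true) := by
      simp only [pvOverlap, pvMemScan_eq, pvMemScanAnd_eq]
    by_cases hrev : pvMemScan r gr
    · by_cases hresp : pvMemScanAnd s gq true
      · simp [pvScanGs, hrev, hresp, hov]
      · simp [pvScanGs, hrev, hresp, hov, ih]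
    · simp [pvScanGs, hrev, hov, ih]

lemma pvScanHyp_eq (gr gq : List Int) (al : List (List Int × List Int)) (m0 : Bool) :
    ((pvScanHyp gr gq al m0 false).1 && (pvScanHyp gr gq al m0 false).2)
      = al.any (fun h => pvOverlap (gr, gq) h) := by
  induction al generalizing m0 with
  | nil => simp [pvScanHyp]
  | cons h rest ih =>
    obtain ⟨hr, hq⟩ := h
    rw [List.any_cons]
    have hov : pvOverlap (gr, gq) (hr, hq) = (pvMemScan gr hr && pvMemScan gq hq) := by
      simp only [pvOverlap, pvMemScan_eq]
    by_cases hrev : pvMemScan gr hr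
    · by_cases hresp : pvMemScan gq hq
      · simp [pvScanHyp, hrev, hresp, hov]
      · simp [pvScanHyp, hrev, hresp, hov, ih]
    · simp [pvScanHyp, hrev, hov, ih]

-- membership in the candidate-union fold
lemma pv_mem_candFold (xs : List Int) (idx : PySem.Dict Int (PySem.Set Int)) (c : PySem.Set Int) (k : Int) :
    k ∈ xs.foldl (fun c i => PySem.Set.union c (idx.getD i PySem.Set.empty)) c
      ↔ k ∈ c ∨ ∃ i ∈ xs, k ∈ idx.getD i PySem.Set.empty := by
  induction xs generalizing c with
  | nil => simp
  | cons i0 rest ih =>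
    rw [List.foldl_cons, ih, PySem.Set.mem_union]
    constructor
    · rintro (⟨h | h⟩ | ⟨i, hi, h⟩)
      · exact Or.inl h
      · exact Or.inr ⟨i0, by simp, h⟩
      · exact Or.inr ⟨i, by simp [hi], h⟩
    · rintro (h | ⟨i, hi, h⟩)
      · exact Or.inl (Or.inl h)
      · rcases List.mem_cons.mp hi with rfl | hi
        · exact Or.inl (Or.inr h)
        · exact Or.inr ⟨i, hi, h⟩

-- membership through the inner index-building fold
lemma pv_mem_innerFold (xs : List Int) (d : PySem.Dict Int (PySem.Set Int)) (j i k : Int) :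
    k ∈ ((xs.foldl (fun d i => d.modify i PySem.Set.empty (fun st => PySem.Set.add st j)) d).getD i PySem.Set.empty)
      ↔ k ∈ d.getD i PySem.Set.empty ∨ (i ∈ xs ∧ k = j) := by
  induction xs generalizing d with
  | nil => simp
  | cons i0 rest ih =>
    rw [List.foldl_cons, ih, PySem.Dict.getD_modify]
    by_cases hi : i = i0
    · subst hi
      simp [PySem.Set.mem_add]
      tauto
    · simp [hi]

-- membership through the outer index-building fold, any start index and dict
lemma pv_mem_outerFold (al : List (List Int × List Int)) (side : Nat) (s0 : Int)
    (d : PySem.Dict Int (PySem.Set Int)) (i k : Int) :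
    k ∈ ((PySem.List.enumerate al s0).foldl
          (fun idx kp =>
            (if side == 0 then kp.2.1 else kp.2.2).foldl
              (fun idx i => idx.modify i PySem.Set.empty (fun st => PySem.Set.add st kp.1)) idx)
          d).getD i PySem.Set.empty
      ↔ k ∈ d.getD i PySem.Set.empty ∨
          ∃ q ∈ PySem.List.enumerate al s0, i ∈ (if side == 0 then q.2.1 else q.2.2) ∧ k = q.1 := by
  induction al generalizing s0 d with
  | nil => simp [PySem.List.enumerate_nil]
  | cons p rest ih =>
    rw [PySem.List.enumerate_cons, List.foldl_cons, ih, pv_mem_innerFold]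
    constructor
    · rintro (⟨h | ⟨hmem, hks⟩⟩ | ⟨q, hq, hiq, hkq⟩)
      · exact Or.inl h
      · exact Or.inr ⟨(s0, p), by simp, hmem, hks⟩
      · exact Or.inr ⟨q, by simp [hq], hiq, hkq⟩
    · rintro (h | ⟨q, hq, hiq, hkq⟩)
      · exact Or.inl (Or.inl h)
      · rcases List.mem_cons.mp hq with rfl | hq2
        · exact Or.inl (Or.inr ⟨hiq, hkq⟩)
        · exact Or.inr ⟨q, hq2, hiq, hkq⟩

-- membership through the whole index build
lemma pv_mem_buildIndex (al : List (List Int × List Int)) (side : Nat) (i k : Int) :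
    k ∈ (pvBuildIndex al side).getD i PySem.Set.empty
      ↔ ∃ q ∈ PySem.List.enumerate al, i ∈ (if side == 0 then q.2.1 else q.2.2) ∧ k = q.1 := by
  rw [pvBuildIndex, pv_mem_outerFold]
  simp [PySem.Dict.getD_empty, PySem.Set.empty]

lemma pv_enum_fst_lb (al : List (List Int × List Int)) (s0 : Int) (q : Int × (List Int × List Int))
    (h : q ∈ PySem.List.enumerate al s0) : s0 ≤ q.1 := by
  induction al generalizing s0 with
  | nil => simp [PySem.List.enumerate_nil] at h
  | cons p rest ih =>
    rw [PySem.List.enumerate_cons] at h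
    rcases List.mem_cons.mp h with rfl | h
    · simp
    · have := ih (s0 + 1) h
      omega

lemma pv_enum_inj (al : List (List Int × List Int)) (s0 : Int) (q q' : Int × (List Int × List Int))
    (h : q ∈ PySem.List.enumerate al s0) (h' : q' ∈ PySem.List.enumerate al s0) (he : q.1 = q'.1) : q = q' := by
  induction al generalizing s0 with
  | nil => simp [PySem.List.enumerate_nil] at h
  | cons p rest ih =>
    rw [PySem.List.enumerate_cons] at h h'
    rcases List.mem_cons.mp h with rfl | h <;> rcases List.mem_cons.mp h' with rfl | h'
    · rfl
    · have := pv_enum_fst_lb rest (s0 + 1) q' h'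
      simp at he; omega
    · have := pv_enum_fst_lb rest (s0 + 1) q h
      simp at he; omega
    · exact ih (s0 + 1) h h' 

-- a tuple has a candidate index common to both sides iff some gold tuple overlaps it on both sides
lemma pv_tuple_iff (al : List (List Int × List Int)) (p : List Int × List Int) :
    (∃ kk : Int, (∃ i ∈ p.1, kk ∈ (pvBuildIndex al 0).getD i PySem.Set.empty) ∧
        (∃ j ∈ p.2, kk ∈ (pvBuildIndex al 1).getD j PySem.Set.empty))
      ↔ al.any (fun g => pvOverlap p g) = true := by
  simp only [pvOverlap, List.any_eq_true, Bool.and_eq_true, List.contains_iff_mem]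
  constructor
  · rintro ⟨kk, ⟨i, hi, hki⟩, ⟨j, hj, hkj⟩⟩
    rw [pv_mem_buildIndex] at hki hkj
    obtain ⟨q, hq, hiq, hkq⟩ := hki
    obtain ⟨q', hq', hjq, hkq'⟩ := hkj
    have hqq : q = q' := pv_enum_inj al 0 q q' hq hq' (by omega)
    subst hqq
    have hgm : q.2 ∈ al := by
      have hm := PySem.List.map_snd_enumerate al 0
      rw [← hm]
      exact List.mem_map_of_mem hq
    exact ⟨q.2, hgm, ⟨i, hi, by simpa using hiq⟩, ⟨j, hj, by simpa using hjq⟩⟩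
  · rintro ⟨g, hg, ⟨i, hi, hig⟩, ⟨j, hj, hjg⟩⟩
    have hg' : g ∈ (PySem.List.enumerate al 0).map (·.2) := by
      rw [PySem.List.map_snd_enumerate]; exact hg
    obtain ⟨q, hq, hq2⟩ := List.mem_map.mp hg'
    refine ⟨q.1, ⟨i, hi, ?_⟩, ⟨j, hj, ?_⟩⟩
    · exact (pv_mem_buildIndex al 0 i q.1).mpr ⟨q, hq, by simp [hq2, hig], rfl⟩
    · exact (pv_mem_buildIndex al 1 j q.1).mpr ⟨q, hq, by simp [hq2, hjg], rfl⟩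

lemma pv_foldl_cnt (l : List (List Int × List Int)) (c : List Int × List Int → Bool) (a : Int) :
    l.foldl (fun n x => if c x then n + 1 else n) a = a + (l.countP c : Int) := by
  induction l generalizing a with
  | nil => simp
  | cons x rest ih => by_cases h : c x <;> simp [h, ih, List.countP_cons] <;> omega

lemma pvCountMatched_eq (src al : List (List Int × List Int)) :
    pvCountMatched src (pvBuildIndex al 0) (pvBuildIndex al 1)
      = (src.countP (fun p => al.any (fun g => pvOverlap p g)) : Int) := by
  rw [pvCountMatched]
  rw [List.foldl_ext _ (fun n p => if al.any (fun g => pvOverlap p g) then n + 1 else n) 0 ?_]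
  · rw [pv_foldl_cnt]; omega
  · intro n p _
    have hcand : ∀ kk : Int,
        kk ∈ p.1.foldl (fun c i => PySem.Set.union c ((pvBuildIndex al 0).getD i PySem.Set.empty)) PySem.Set.empty
          ↔ ∃ i ∈ p.1, kk ∈ (pvBuildIndex al 0).getD i PySem.Set.empty := by
      intro kk
      rw [pv_mem_candFold]
      simp [PySem.Set.empty]
    have hcand2 : ∀ kk : Int,
        kk ∈ p.2.foldl (fun c j => PySem.Set.union c ((pvBuildIndex al 1).getD j PySem.Set.empty)) PySem.Set.empty
          ↔ ∃ j ∈ p.2, kk ∈ (pvBuildIndex al 1).getD j PySem.Set.empty := by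
      intro kk
      rw [pv_mem_candFold]
      simp [PySem.Set.empty]
    set cand := p.1.foldl (fun c i => PySem.Set.union c ((pvBuildIndex al 0).getD i PySem.Set.empty)) PySem.Set.empty with hc1
    set cand2 := p.2.foldl (fun c j => PySem.Set.union c ((pvBuildIndex al 1).getD j PySem.Set.empty)) PySem.Set.empty with hc2
    have hiff : (∃ kk : Int, kk ∈ cand ∧ kk ∈ cand2) ↔ al.any (fun g => pvOverlap p g) = true := by
      rw [← pv_tuple_iff al p]
      constructor
      · rintro ⟨kk, h1, h2⟩
        exact ⟨kk, (hcand kk).mp h1, (hcand2 kk).mp h2⟩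
      · rintro ⟨kk, h1, h2⟩
        exact ⟨kk, (hcand kk).mpr h1, (hcand2 kk).mpr h2⟩
    by_cases hce : cand.isEmpty
    · have hfalse : al.any (fun g => pvOverlap p g) = false := by
        rw [Bool.eq_false_iff]
        intro hT
        obtain ⟨kk, h1, _⟩ := hiff.mpr hT
        rw [List.isEmpty_iff] at hce
        rw [hce] at h1
        simp at h1
      simp [hce, hfalse]
    · by_cases hI : (PySem.Set.inter cand cand2).isEmpty
      · have hfalse : al.any (fun g => pvOverlap p g) = false := by
          rw [Bool.eq_false_iff]
          intro hT
          obtain ⟨kk, h1, h2⟩ := hiff.mpr hT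
          have : kk ∈ PySem.Set.inter cand cand2 := (PySem.Set.mem_inter cand cand2 kk).mpr ⟨h1, h2⟩
          rw [List.isEmpty_iff] at hI
          rw [hI] at this
          simp at this
        simp [hce, hI, hfalse]
      · have htrue : al.any (fun g => pvOverlap p g) = true := by
          rcases hx : PySem.Set.inter cand cand2 with _ | ⟨kk, t⟩
          · rw [List.isEmpty_iff] at hI; exact absurd hx hI
          · have hkk : kk ∈ PySem.Set.inter cand cand2 := by rw [hx]; simp
            have := (PySem.Set.mem_inter cand cand2 kk).mp hkk
            exact hiff.mp ⟨kk, this.1, this.2⟩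
        simp [hce, hI, htrue]

lemma pv_foldl_tpfp (l : List (List Int × List Int)) (c : List Int × List Int → Bool) (a b : Int) :
    l.foldl (fun acc x => if c x then (acc.1 + 1, acc.2) else (acc.1, acc.2 + 1)) (a, b)
      = (a + l.countP c, b + ((l.length : Int) - l.countP c)) := by
  induction l generalizing a b with
  | nil => simp
  | cons x rest ih =>
    by_cases h : c x <;> simp [h, ih] <;> omega

lemma pv_foldl_fn (l : List (List Int × List Int)) (c : List Int × List Int → Bool) (a : Int) :
    l.foldl (fun n x => if !(c x) then n + 1 else n) a = a + ((l.length : Int) - l.countP c) := by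
  induction l generalizing a with
  | nil => simp
  | cons x rest ih =>
    simp only [List.foldl_cons]
    by_cases h : c x
    · rw [show (if !c x then a + 1 else a) = a by simp [h], ih, List.countP_cons]
      have := List.countP_le_length (l := rest) (p := c)
      simp only [h, List.length_cons]; push_cast; omega
    · rw [show (if !c x then a + 1 else a) = a + 1 by simp [h], ih, List.countP_cons]
      simp only [h, List.length_cons]; push_cast; omega

-- ===== VERDICT (by name: the statement is the Claim_ definition above) =====
theorem partial_tp_fp_fn_spec : Claim_equal_partial_tp_fp_fn := by
  intro hyp_al gs_al _
  show partial_tp_fp_fn hyp_al gs_al = partial_tp_fp_fn_alt hyp_al gs_al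
  unfold partial_tp_fp_fn partial_tp_fp_fn_alt
  rw [pvCountMatched_eq, pvCountMatched_eq]
  rw [List.foldl_ext _
      (fun (acc : Int × Int) p =>
        if gs_al.any (fun g => pvOverlap (p.1, p.2) g) then (acc.1 + 1, acc.2) else (acc.1, acc.2 + 1))
      ((0 : Int), (0 : Int)) (by intro acc p _; simp only [pvScanGs_eq])]
  rw [List.foldl_ext _
      (fun (n : Int) g =>
        if !(hyp_al.any (fun h => pvOverlap (g.1, g.2) h)) then n + 1 else n)
      (0 : Int) (by intro n g _; simp only [pvScanHyp_eq])]
  rw [pv_foldl_tpfp, pv_foldl_fn]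
  have e1 : hyp_al.countP (fun p => gs_al.any (fun g => pvOverlap (p.1, p.2) g))
      = hyp_al.countP (fun p => gs_al.any (fun g => pvOverlap p g)) :=
    List.countP_congr (fun x _ => Iff.rfl)
  have e2 : gs_al.countP (fun g => hyp_al.any (fun h => pvOverlap (g.1, g.2) h))
      = gs_al.countP (fun g => hyp_al.any (fun h => pvOverlap g h)) :=
    List.countP_congr (fun x _ => Iff.rfl)
  simp only [e1, e2, Prod.mk.injEq]
  refine ⟨by omega, by omega, by omega⟩
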